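-- pv_equiv track=rewrite | github.com/kuis221/merchlab | firebase_api.py | decode_firebase_encoded_string
-- ===== SOURCE A (Python) =====
-- SPECIAL_CHARACTER_MAPPING = {
--     '.': '\_PERIOD_CHAR',
--     '$': '\_DOLLAR_SIGN',
--     '#': '\_HASHTAG_SIGN',
--     '[': '\_LEFT_SQUARE_BRACKET',
--     ']': '\_RIGHT_SQUARE_BRACKET',
--     '/': '\_FORWARD_SLASH'
-- }
--
-- def decode_firebase_encoded_string(string):
--     reverse_mapping = {}
--     for key in SPECIAL_CHARACTER_MAPPING:
--         reverse_mapping[SPECIAL_CHARACTER_MAPPING[key]] = key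
--
--     for char in reverse_mapping:
--         decoded_char = reverse_mapping[char]
--         string = string.replace(char, decoded_char)
--     return string
-- ===== SOURCE B (Python) =====
-- SPECIAL_CHARACTER_MAPPING = {
--     '.': '\_PERIOD_CHAR',
--     '$': '\_DOLLAR_SIGN',
--     '#': '\_HASHTAG_SIGN',
--     '[': '\_LEFT_SQUARE_BRACKET',
--     ']': '\_RIGHT_SQUARE_BRACKET',
--     '/': '\_FORWARD_SLASH'
-- }
--
--
-- def decode_firebase_encoded_string(string):
--     # One left-to-right pass: at each position try the encoded tokens; on a hit
--     # emit the decoded character and jump over the token, otherwise copy the char.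
--     reverse_mapping = {v: k for k, v in SPECIAL_CHARACTER_MAPPING.items()}
--     out = []
--     i = 0
--     n = len(string)
--     while i < n:
--         for token, ch in reverse_mapping.items():
--             if string.startswith(token, i):
--                 out.append(ch)
--                 i += len(token)
--                 break
--         else:
--             out.append(string[i])
--             i += 1
--     return ''.join(out)
-- ===== Notes on version B (the rewrite author's own statement) =====
-- stated objective: alternative
-- what changed: A runs six sequential full-string str.replace passes (one per encoded token); B builds the reverse token dict once and decodes in a single left-to-right scan that tries all tokens at each position, which is sound because tokens never overlap and decoded characters cannot recreate a token.
import Mathlib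
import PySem

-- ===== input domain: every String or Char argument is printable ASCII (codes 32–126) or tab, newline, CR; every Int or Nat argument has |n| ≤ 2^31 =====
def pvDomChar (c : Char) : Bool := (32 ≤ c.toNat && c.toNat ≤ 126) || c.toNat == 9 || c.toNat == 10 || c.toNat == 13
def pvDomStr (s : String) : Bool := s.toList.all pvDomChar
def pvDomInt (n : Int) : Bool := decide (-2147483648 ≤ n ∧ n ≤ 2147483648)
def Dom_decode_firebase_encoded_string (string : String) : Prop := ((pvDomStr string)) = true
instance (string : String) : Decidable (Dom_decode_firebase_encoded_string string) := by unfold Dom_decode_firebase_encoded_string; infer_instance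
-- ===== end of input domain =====

-- B replaces A's six sequential full-string replace passes by one left-to-right scan that
-- tries all tokens at each position (objective: alternative single-pass algorithm, same result).

-- ===== PORT A =====
def SPECIAL_CHARACTER_MAPPING : PySem.Dict String String :=
  ⟨[(".", "\\_PERIOD_CHAR"), ("$", "\\_DOLLAR_SIGN"), ("#", "\\_HASHTAG_SIGN"),
    ("[", "\\_LEFT_SQUARE_BRACKET"), ("]", "\\_RIGHT_SQUARE_BRACKET"), ("/", "\\_FORWARD_SLASH")]⟩

-- 'reverse_mapping[SPECIAL_CHARACTER_MAPPING[key]] = key' / 'reverse_mapping[char]': the looked-up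
-- key is always present, so the Python subscripts never raise; ported with getD (default unreachable).
def decode_firebase_encoded_string (string : String) : String :=
  let reverse_mapping : PySem.Dict String String :=
    (PySem.Dict.keys SPECIAL_CHARACTER_MAPPING).foldl
      (fun rm key => PySem.Dict.insert rm (PySem.Dict.getD SPECIAL_CHARACTER_MAPPING key "") key)
      PySem.Dict.empty
  (PySem.Dict.keys reverse_mapping).foldl
    (fun s ch => PySem.Str.replace s ch (PySem.Dict.getD reverse_mapping ch "")) string

-- ===== PORT B =====
-- Source B's reverse_mapping = {v: k for k, v in SPECIAL_CHARACTER_MAPPING.items()}, at char level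
def pvRevTokens : List (List Char × Char) :=
  [("\\_PERIOD_CHAR".toList, '.'), ("\\_DOLLAR_SIGN".toList, '$'), ("\\_HASHTAG_SIGN".toList, '#'),
   ("\\_LEFT_SQUARE_BRACKET".toList, '['), ("\\_RIGHT_SQUARE_BRACKET".toList, ']'),
   ("\\_FORWARD_SLASH".toList, '/')]

-- every token is nonempty (cited by decode_scan's termination proof)
theorem pvRevTokens_len_pos : ∀ p ∈ pvRevTokens, 0 < p.1.length := by decide

-- Source B's while loop: 'for token, ch in reverse_mapping.items(): if string.startswith(token, i): …'
-- is the find? over pvRevTokens; hit → emit ch and jump over the token, miss → copy one char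
def decode_scan (l : List Char) : List Char :=
  match h : pvRevTokens.find? (fun p => PySem.Chars.startswith l p.1) with
  | some p => p.2 :: decode_scan (l.drop p.1.length)
  | none =>
    match l with
    | [] => []
    | c :: t => c :: decode_scan t
termination_by l.length
decreasing_by
  · have hmem := List.mem_of_find?_eq_some h
    have hpos : 0 < p.1.length := pvRevTokens_len_pos p hmem
    have hpre : p.1 <+: l := (PySem.Chars.startswith_iff l p.1).mp (by simpa using List.find?_some h)
    have := hpre.length_le
    simp only [List.length_drop]; omega
  · simp only [List.length_cons]; omega

def decode_firebase_encoded_string_alt (string : String) : String :=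
  String.ofList (decode_scan string.toList)

-- ===== PRECONDITION & SPEC =====
def Spec_decode_firebase_encoded_string (string : String) (out : String) : Prop := out = decode_firebase_encoded_string_alt string
instance (string : String) (out : String) : Decidable (Spec_decode_firebase_encoded_string string out) := by unfold Spec_decode_firebase_encoded_string; infer_instance

-- ===== CLAIM (what is proved, stated in full; the proofs are below) =====
def Claim_equal_decode_firebase_encoded_string : Prop := ∀ (string : String), Dom_decode_firebase_encoded_string string → Spec_decode_firebase_encoded_string string (decode_firebase_encoded_string string)

-- ===== LEMMAS AND PROOFS =====

-- structural version of str.replace (PySem.Chars.replace without the fuel/accumulator)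
def replF (tok rep : List Char) (l : List Char) : List Char :=
  if h : tok ≠ [] ∧ tok.isPrefixOf l then rep ++ replF tok rep (l.drop tok.length)
  else match l with
    | [] => []
    | c :: t => c :: replF tok rep t
termination_by l.length
decreasing_by
  · have hp : tok <+: l := by simpa using h.2
    have h1 : 0 < tok.length := List.length_pos_iff.mpr h.1
    have h2 : tok.length ≤ l.length := hp.length_le
    simp only [List.length_drop]; omega
  · simp only [List.length_cons]; omega

theorem replF_nil (tok rep : List Char) (htok : tok ≠ []) : replF tok rep [] = [] := by
  rw [replF, dif_neg (by simp [List.isPrefixOf_iff_prefix, List.prefix_nil, htok])]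

theorem replF_pref (tok rep l : List Char) (htok : tok ≠ []) (hp : tok <+: l) :
    replF tok rep l = rep ++ replF tok rep (l.drop tok.length) := by
  rw [replF, dif_pos ⟨htok, List.isPrefixOf_iff_prefix.mpr hp⟩]

theorem replF_cons (tok rep : List Char) (c : Char) (t : List Char) (hp : ¬ tok <+: (c :: t)) :
    replF tok rep (c :: t) = c :: replF tok rep t := by
  rw [replF, dif_neg (by simp [List.isPrefixOf_iff_prefix, hp])]

theorem go_eq (tok rep : List Char) (htok : tok ≠ []) :
    ∀ fuel (l acc : List Char), l.length ≤ fuel →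
      PySem.Chars.replace.go tok rep fuel l acc = acc.reverse ++ replF tok rep l := by
  intro fuel
  induction fuel with
  | zero =>
    intro l acc hl
    have : l = [] := List.eq_nil_of_length_eq_zero (by omega)
    subst this
    simp [PySem.Chars.replace.go, replF_nil tok rep htok]
  | succ n ih =>
    intro l acc hl
    match l with
    | [] => simp [PySem.Chars.replace.go, replF_nil tok rep htok]
    | c :: t =>
      rw [PySem.Chars.replace.go]
      by_cases hp : tok.isPrefixOf (c :: t)
      · have h1 : 0 < tok.length := List.length_pos_iff.mpr htok
        rw [if_pos hp, ih _ _ (by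
          have hple : tok.length ≤ (c :: t).length := (List.isPrefixOf_iff_prefix.mp hp).length_le
          simp only [List.length_drop, List.length_cons] at *; omega)]
        rw [replF_pref tok rep _ htok (List.isPrefixOf_iff_prefix.mp hp)]
        simp
      · rw [if_neg hp, ih _ _ (by simp only [List.length_cons] at hl; omega)]
        rw [replF_cons tok rep c t (by simpa [List.isPrefixOf_iff_prefix] using hp)]
        simp

theorem replace_eq_replF (l tok rep : List Char) (htok : tok ≠ []) :
    PySem.Chars.replace l tok rep = replF tok rep l := by
  rw [PySem.Chars.replace, if_neg (by simpa using htok)]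
  simpa using go_eq tok rep htok l.length l [] le_rfl

-- A's sequence of replace passes, on char lists, applied in dict-insertion order
def compL (ts : List (List Char × Char)) (l : List Char) : List Char :=
  ts.foldl (fun acc p => replF p.1 [p.2] acc) l

set_option maxHeartbeats 1000000 in
theorem decode_eq (s : String) :
    decode_firebase_encoded_string s = String.ofList (compL pvRevTokens s.toList) := by
  have h1 : decode_firebase_encoded_string s =
      PySem.Str.replace (PySem.Str.replace (PySem.Str.replace (PySem.Str.replace (PySem.Str.replace
        (PySem.Str.replace s "\\_PERIOD_CHAR" ".") "\\_DOLLAR_SIGN" "$") "\\_HASHTAG_SIGN" "#")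
        "\\_LEFT_SQUARE_BRACKET" "[") "\\_RIGHT_SQUARE_BRACKET" "]") "\\_FORWARD_SLASH" "/" := by
    simp [decode_firebase_encoded_string, SPECIAL_CHARACTER_MAPPING, PySem.Dict.keys,
          PySem.Dict.insert, PySem.Dict.getD, PySem.Dict.empty, PySem.Dict.contains,
          PySem.Dict.get?, List.foldl]
  rw [h1]
  rw [show ∀ x o n : String, PySem.Str.replace x o n =
        String.ofList (PySem.Chars.replace x.toList o.toList n.toList) from fun _ _ _ => rfl]
  simp only [PySem.Str.toList_replace]
  rw [replace_eq_replF _ _ _ (by decide), replace_eq_replF _ _ _ (by decide),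
      replace_eq_replF _ _ _ (by decide), replace_eq_replF _ _ _ (by decide),
      replace_eq_replF _ _ _ (by decide), replace_eq_replF _ _ _ (by decide)]
  rfl

-- concrete facts about the six tokens: all start with '\', no decoded char occurs in a token
-- tail or equals '\', and distinct tokens never overlap at any offset
theorem tokFacts :
    (∀ p ∈ pvRevTokens, p.1.head? = some '\\') ∧
    (∀ p ∈ pvRevTokens, ∀ q ∈ pvRevTokens, p.2 ∉ q.1.tail ∧ p.2 ≠ '\\') ∧
    (∀ p ∈ pvRevTokens, ∀ q ∈ pvRevTokens, p.1 ≠ q.1 →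
       ∀ pos < q.1.length, ¬ p.1 <+: q.1.drop pos ∧ ¬ q.1.drop pos <+: p.1) := by decide

theorem tok_ne_nil {p : List Char × Char} (hp : p ∈ pvRevTokens) : p.1 ≠ [] := by
  have := pvRevTokens_len_pos p hp
  exact List.ne_nil_of_length_pos this

theorem nonoverlap {p q : List Char × Char} (hp : p ∈ pvRevTokens) (hq : q ∈ pvRevTokens)
    (hne : p.1 ≠ q.1) : ∀ pos < q.1.length, ∀ u, ¬ p.1 <+: q.1.drop pos ++ u := by
  intro pos hpos u hpre
  obtain ⟨h1, h2⟩ := tokFacts.2.2 p hp q hq hne pos hpos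
  by_cases hlen : p.1.length ≤ (q.1.drop pos).length
  · exact h1 ((List.isPrefix_append_of_length hlen).mp hpre)
  · exact h2 (List.prefix_of_prefix_length_le (List.prefix_append _ u) hpre (by omega))

-- peel a block none of whose suffixes starts an occurrence of tok
theorem replF_peel (tok rep : List Char) :
    ∀ (a u : List Char), (∀ pos < a.length, ¬ tok <+: a.drop pos ++ u) →
      replF tok rep (a ++ u) = a ++ replF tok rep u := by
  intro a
  induction a with
  | nil => intro u _; rfl
  | cons x a' ih =>
    intro u h
    have h0 : ¬ tok <+: (x :: a') ++ u := by simpa using h 0 (by simp)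
    rw [List.cons_append, replF_cons tok rep x (a' ++ u) h0, ih u (fun pos hpos => h (pos + 1) (by simp; omega))]
    rfl

-- the decoded (special) chars never re-create a token occurrence: a '\'-free, rep-char-free
-- r is a prefix of the replaced text only if it was a prefix before
theorem prefix_replF_rev (tok : List Char) (c : Char) (htok : tok ≠ []) :
    ∀ n (l r : List Char), l.length ≤ n → c ∉ r → r <+: replF tok [c] l → r <+: l := by
  intro n
  induction n with
  | zero =>
    intro l r hl _ hpre
    have : l = [] := List.eq_nil_of_length_eq_zero (by omega)
    subst this
    rwa [replF_nil tok [c] htok] at hpre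
  | succ n ih =>
    intro l r hl hc hpre
    by_cases hp : tok <+: l
    · rw [replF_pref tok [c] l htok hp] at hpre
      match r, hpre with
      | [], _ => exact List.nil_prefix
      | r0 :: r', hpre =>
        rw [List.singleton_append, List.cons_prefix_cons] at hpre
        exact absurd (hpre.1 ▸ List.mem_cons_self) hc
    · match l with
      | [] => rwa [replF_nil tok [c] htok] at hpre
      | d :: t =>
        rw [replF_cons tok [c] d t hp] at hpre
        match r, hpre with
        | [], _ => exact List.nil_prefix
        | r0 :: r', hpre =>
          rw [List.cons_prefix_cons] at hpre
          have : r' <+: t := ih t r' (by simp at hl; omega)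
            (fun hx => hc (List.mem_cons_of_mem _ hx)) hpre.2
          exact List.cons_prefix_cons.mpr ⟨hpre.1, this⟩

-- peeling a matched token through the passes of tokens that differ from it
theorem compL_peel_tok (ts : List (List Char × Char)) (hmem : ∀ q ∈ ts, q ∈ pvRevTokens)
    (tk : List Char × Char) (htk : tk ∈ pvRevTokens) (hne : ∀ q ∈ ts, q.1 ≠ tk.1) :
    ∀ u, compL ts (tk.1 ++ u) = tk.1 ++ compL ts u := by
  induction ts with
  | nil => intro u; rfl
  | cons q ts' ih =>
    intro u
    have hq := hmem q List.mem_cons_self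
    have : replF q.1 [q.2] (tk.1 ++ u) = tk.1 ++ replF q.1 [q.2] u :=
      replF_peel q.1 [q.2] tk.1 u
        (fun pos hpos => nonoverlap hq htk (hne q List.mem_cons_self) pos hpos u)
    simp only [compL, List.foldl_cons] at *
    rw [this, ih (fun p hp => hmem p (List.mem_cons_of_mem q hp))
         (fun p hp => hne p (List.mem_cons_of_mem q hp))]

-- peeling a non-'\' head char through all passes
theorem compL_peel_char (ts : List (List Char × Char)) (hmem : ∀ q ∈ ts, q ∈ pvRevTokens) :
    ∀ (c : Char), c ≠ '\\' → ∀ u, compL ts (c :: u) = c :: compL ts u := by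
  induction ts with
  | nil => intro c _ u; rfl
  | cons q ts' ih =>
    intro c hc u
    have hq := hmem q List.mem_cons_self
    have hnp : ¬ q.1 <+: c :: u := by
      intro hpre
      have hhd := tokFacts.1 q hq
      match hq1 : q.1, hpre with
      | [], _ => exact tok_ne_nil hq hq1
      | x :: _, hpre =>
        rw [hq1] at hhd
        simp only [List.head?_cons, Option.some.injEq] at hhd
        rw [List.cons_prefix_cons] at hpre
        exact hc (hpre.1 ▸ hhd ▸ rfl)
    simp only [compL, List.foldl_cons]
    rw [replF_cons q.1 [q.2] c u hnp]
    exact ih (fun p hp => hmem p (List.mem_cons_of_mem q hp)) c hc _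

-- peeling a '\' head char when no token matches there
theorem compL_peel_bslash (ts : List (List Char × Char)) :
    ∀ u, (∀ q ∈ ts, q ∈ pvRevTokens) → (∀ q ∈ ts, ¬ q.1 <+: '\\' :: u) →
      compL ts ('\\' :: u) = '\\' :: compL ts u := by
  induction ts with
  | nil => intro u _ _; rfl
  | cons q ts' ih =>
    intro u hmem hno
    have hq := hmem q List.mem_cons_self
    simp only [compL, List.foldl_cons]
    rw [replF_cons q.1 [q.2] '\\' u (hno q List.mem_cons_self)]
    refine ih (replF q.1 [q.2] u) (fun p hp => hmem p (List.mem_cons_of_mem q hp)) ?_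
    intro p hp hpre
    have hpmem := hmem p (List.mem_cons_of_mem q hp)
    have hhd := tokFacts.1 p hpmem
    match hp1 : p.1, hpre with
    | [], _ => exact tok_ne_nil hpmem hp1
    | x :: r, hpre =>
      rw [hp1] at hhd
      simp only [List.head?_cons, Option.some.injEq] at hhd
      rw [List.cons_prefix_cons] at hpre
      have hcr : q.2 ∉ r := by
        have := (tokFacts.2.1 q hq p hpmem).1
        rw [hp1] at this
        simpa using this
      have hrt : r <+: u :=
        prefix_replF_rev q.1 q.2 (tok_ne_nil hq) u.length u r le_rfl hcr hpre.2
      exact hno p (List.mem_cons_of_mem q hp) (by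
        rw [hp1]
        exact List.cons_prefix_cons.mpr ⟨hhd, hrt⟩)

theorem compL_nil (ts : List (List Char × Char)) (hmem : ∀ q ∈ ts, q ∈ pvRevTokens) :
    compL ts [] = [] := by
  induction ts with
  | nil => rfl
  | cons q ts' ih =>
    simp only [compL, List.foldl_cons]
    rw [replF_nil q.1 [q.2] (tok_ne_nil (hmem q List.mem_cons_self))]
    exact ih (fun p hp => hmem p (List.mem_cons_of_mem q hp))

theorem decode_scan_some (l : List Char) (tk : List Char × Char)
    (hf : pvRevTokens.find? (fun p => PySem.Chars.startswith l p.1) = some tk) :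
    decode_scan l = tk.2 :: decode_scan (l.drop tk.1.length) := by
  rw [decode_scan]
  split
  next p heq => rw [hf] at heq; cases heq; rfl
  next heq => rw [hf] at heq; cases heq

theorem decode_scan_none_nil
    (hf : pvRevTokens.find? (fun p => PySem.Chars.startswith [] p.1) = none) :
    decode_scan [] = [] := by
  rw [decode_scan]
  split
  next p heq => rw [hf] at heq; cases heq
  next => rfl

theorem decode_scan_none_cons (c : Char) (t : List Char)
    (hf : pvRevTokens.find? (fun p => PySem.Chars.startswith (c :: t) p.1) = none) :
    decode_scan (c :: t) = c :: decode_scan t := by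
  rw [decode_scan]
  split
  next p heq => rw [hf] at heq; cases heq
  next => rfl

theorem compL_eq_scan : ∀ n (l : List Char), l.length ≤ n →
    compL pvRevTokens l = decode_scan l := by
  intro n
  induction n with
  | zero =>
    intro l hl
    have : l = [] := List.eq_nil_of_length_eq_zero (by omega)
    subst this
    rw [compL_nil pvRevTokens (fun q hq => hq), decode_scan_none_nil (by decide)]
  | succ n ih =>
    intro l hl
    match hf : pvRevTokens.find? (fun p => PySem.Chars.startswith l p.1) with
    | some tk =>
      obtain ⟨hpred, pre, post, hsplit, hpre_no⟩ := List.find?_eq_some_iff_append.mp hf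
      have htkmem : tk ∈ pvRevTokens := List.mem_of_find?_eq_some hf
      have htkpre : tk.1 <+: l := (PySem.Chars.startswith_iff l tk.1).mp hpred
      have hlsplit : l = tk.1 ++ l.drop tk.1.length := List.prefix_append_drop htkpre
      have hmem_pre : ∀ q ∈ pre, q ∈ pvRevTokens := by
        intro q hq; rw [hsplit]; exact List.mem_append_left _ hq
      have hmem_post : ∀ q ∈ post, q ∈ pvRevTokens := by
        intro q hq; rw [hsplit]
        exact List.mem_append_right _ (List.mem_cons_of_mem tk hq)
      have hne_pre : ∀ q ∈ pre, q.1 ≠ tk.1 := by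
        intro q hq heq
        have := hpre_no q hq
        simp only [Bool.not_eq_eq_eq_not, Bool.not_true] at this
        rw [heq, hpred] at this
        simp at this
      set u := l.drop tk.1.length with hu
      have hulen : u.length ≤ n := by
        have h1 := pvRevTokens_len_pos tk htkmem
        have h2 := htkpre.length_le
        simp only [hu, List.length_drop]; omega
      -- compute compL on l = tk.1 ++ u
      have hcomp : compL pvRevTokens l = tk.2 :: compL pvRevTokens u := by
        conv_lhs => rw [hsplit, hlsplit]
        show List.foldl _ (tk.1 ++ u) (pre ++ tk :: post) = _
        rw [List.foldl_append]
        have e1 : List.foldl (fun acc p => replF p.1 [p.2] acc) (tk.1 ++ u) pre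
            = tk.1 ++ compL pre u :=
          compL_peel_tok pre hmem_pre tk htkmem hne_pre u
        rw [e1]
        simp only [List.foldl_cons]
        rw [replF_pref tk.1 [tk.2] _ (tok_ne_nil htkmem) (List.prefix_append _ _),
            List.drop_left, List.singleton_append]
        have e2 : List.foldl (fun acc p => replF p.1 [p.2] acc)
            (tk.2 :: replF tk.1 [tk.2] (compL pre u)) post
            = tk.2 :: List.foldl (fun acc p => replF p.1 [p.2] acc)
                (replF tk.1 [tk.2] (compL pre u)) post :=
          compL_peel_char post hmem_post tk.2 (tokFacts.2.1 tk htkmem tk htkmem).2 _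
        rw [e2]
        congr 1
        conv_rhs => rw [hsplit]
        show _ = List.foldl _ u (pre ++ tk :: post)
        rw [List.foldl_append]
        simp only [List.foldl_cons]
        rfl
      rw [hcomp, decode_scan_some l tk hf, ih u hulen]
    | none =>
      have hnone : ∀ q ∈ pvRevTokens, ¬ q.1 <+: l := by
        intro q hq hpre
        have := List.find?_eq_none.mp hf q hq
        exact this ((PySem.Chars.startswith_iff l q.1).mpr hpre)
      cases l with
      | nil =>
        rw [compL_nil pvRevTokens (fun q hq => hq), decode_scan_none_nil hf]
      | cons c t =>
        have ht : t.length ≤ n := by simp at hl; omega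
        by_cases hc : c = '\\'
        · subst hc
          rw [compL_peel_bslash pvRevTokens t (fun q hq => hq) hnone,
              decode_scan_none_cons _ t hf, ih t ht]
        · rw [compL_peel_char pvRevTokens (fun q hq => hq) c hc t,
              decode_scan_none_cons c t hf, ih t ht]

-- ===== VERDICT (by name: the statement is the Claim_ definition above) =====
theorem decode_firebase_encoded_string_spec : Claim_equal_decode_firebase_encoded_string := by
  intro s _
  unfold Spec_decode_firebase_encoded_string decode_firebase_encoded_string_alt
  rw [decode_eq s, compL_eq_scan s.toList.length s.toList le_rfl]
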